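-- pv_equiv track=rewrite | github.com/LeonardoR995/SistemasExpertos | Preposiciones 4.py | identificar_operadores
-- ===== SOURCE A (Python) =====
-- def identificar_operadores(proposicion):
--     proposicion = proposicion.lower()
--     operadores = []
--     proposiciones_simples = []
--     tokens = proposicion.split()
--     temp_proposicion = []
--     negacion = False
--
--     for token in tokens:
--         if token == "no":
--             negacion = True
--         elif token in ["y", "and", "o", "or"]:
--             if temp_proposicion:
--                 proposicion_texto = " ".join(temp_proposicion).strip()
--                 if negacion:
--                     proposiciones_simples.append("¬" + proposicion_texto)
--                     negacion = False
--                 else: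
--                     proposiciones_simples.append(proposicion_texto)
--                 temp_proposicion = []
--             operadores.append("and" if token in ["y", "and"] else "or")
--         else:
--             temp_proposicion.append(token)
--
--     if temp_proposicion:
--         proposicion_texto = " ".join(temp_proposicion).strip()
--         if negacion:
--             proposiciones_simples.append("¬" + proposicion_texto)
--         else:
--             proposiciones_simples.append(proposicion_texto)
--
--     return operadores, proposiciones_simples
-- ===== SOURCE B (Python) =====
-- def identificar_operadores(proposicion):
--     # Pass 1: extract the operator list and split the non-operator tokens
--     # into consecutive segments (one segment per run between operators).
--     tokens = proposicion.lower().split()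
--     operadores = []
--     segmentos = []
--     actual = []
--     for token in tokens:
--         if token in ("y", "and"):
--             operadores.append("and")
--             segmentos.append(actual)
--             actual = []
--         elif token in ("o", "or"):
--             operadores.append("or")
--             segmentos.append(actual)
--             actual = []
--         else:
--             actual.append(token)
--     segmentos.append(actual)
--
--     # Pass 2: build the simple propositions, carrying a negation flag that
--     # persists across empty (or all-"no") segments.
--     proposiciones_simples = []
--     negacion = False
--     for seg in segmentos:
--         palabras = [w for w in seg if w != "no"]
--         if len(palabras) < len(seg):
--             negacion = True
--         if palabras:
--             proposiciones_simples.append(("¬" if negacion else "") + " ".join(palabras))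
--             negacion = False
--     return operadores, proposiciones_simples
-- ===== Notes on version B (the rewrite author's own statement) =====
-- stated objective: alternative
-- what changed: Replaces A's single fused loop (mutable temp buffer + negation flag + inline flush at each operator and at the end) by two differently-shaped passes: one pass splits the token stream into the operator list and the non-operator segments, a second pass turns the segments into propositions with a negation flag carried across segments.
import Mathlib
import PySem

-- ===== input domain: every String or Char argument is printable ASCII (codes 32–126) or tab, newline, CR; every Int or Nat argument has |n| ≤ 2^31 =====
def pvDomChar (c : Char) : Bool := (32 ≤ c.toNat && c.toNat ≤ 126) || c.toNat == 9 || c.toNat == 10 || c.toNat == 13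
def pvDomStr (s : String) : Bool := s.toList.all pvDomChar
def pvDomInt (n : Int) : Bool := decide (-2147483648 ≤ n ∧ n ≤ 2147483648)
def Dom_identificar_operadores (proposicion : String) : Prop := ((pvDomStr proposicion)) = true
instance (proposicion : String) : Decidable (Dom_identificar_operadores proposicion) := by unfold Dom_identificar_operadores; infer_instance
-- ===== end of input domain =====

-- B restructures A's single fused loop into two passes (operator/segment split, then proposition building); objective: alternative decomposition, same cost.


-- ===== PORT A =====
-- A-side helpers: the loop body and the trailing flush of A, as written
def stepA (st : List String × List String × List String × Bool) (token : String) :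
    List String × List String × List String × Bool :=
  let (operadores, proposiciones_simples, temp_proposicion, negacion) := st
  if token = "no" then (operadores, proposiciones_simples, temp_proposicion, true)
  else if token = "y" ∨ token = "and" ∨ token = "o" ∨ token = "or" then
    let (proposiciones_simples, temp_proposicion, negacion) :=
      if temp_proposicion ≠ [] then
        let proposicion_texto := PySem.Str.strip (PySem.Str.join " " temp_proposicion)
        if negacion then (proposiciones_simples ++ ["¬" ++ proposicion_texto], ([] : List String), false)
        else (proposiciones_simples ++ [proposicion_texto], ([] : List String), negacion)
      else (proposiciones_simples, temp_proposicion, negacion)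
    (operadores ++ [if token = "y" ∨ token = "and" then "and" else "or"],
      proposiciones_simples, temp_proposicion, negacion)
  else (operadores, proposiciones_simples, temp_proposicion ++ [token], negacion)

def finishA (st : List String × List String × List String × Bool) : List String × List String :=
  let (operadores, proposiciones_simples, temp_proposicion, negacion) := st
  if temp_proposicion ≠ [] then
    let proposicion_texto := PySem.Str.strip (PySem.Str.join " " temp_proposicion)
    if negacion then (operadores, proposiciones_simples ++ ["¬" ++ proposicion_texto])
    else (operadores, proposiciones_simples ++ [proposicion_texto])
  else (operadores, proposiciones_simples)

def identificar_operadores (proposicion : String) : List String × List String :=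
  let proposicion := PySem.Str.lower proposicion
  let tokens := PySem.Str.split₀ proposicion
  finishA (tokens.foldl stepA ([], [], [], false))

-- ===== PORT B =====
-- B-side helpers: the two loop bodies of Source B
def stepB1 (st : List String × List (List String) × List String) (token : String) :
    List String × List (List String) × List String :=
  let (operadores, segmentos, actual) := st
  if token = "y" ∨ token = "and" then (operadores ++ ["and"], segmentos ++ [actual], [])
  else if token = "o" ∨ token = "or" then (operadores ++ ["or"], segmentos ++ [actual], [])
  else (operadores, segmentos, actual ++ [token])

def stepB2 (st : List String × Bool) (seg : List String) : List String × Bool :=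
  let (proposiciones_simples, negacion) := st
  let palabras := seg.filter (fun w => w ≠ "no")
  let negacion := if palabras.length < seg.length then true else negacion
  if palabras ≠ [] then
    (proposiciones_simples ++ [(if negacion then "¬" else "") ++ PySem.Str.join " " palabras], false)
  else (proposiciones_simples, negacion)

def identificar_operadores_alt (proposicion : String) : List String × List String :=
  let tokens := PySem.Str.split₀ (PySem.Str.lower proposicion)
  let (operadores, segmentos, actual) := tokens.foldl stepB1 ([], [], [])
  let segmentos := segmentos ++ [actual]
  (operadores, (segmentos.foldl stepB2 ([], false)).1)

-- ===== PRECONDITION & SPEC =====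
def Spec_identificar_operadores (proposicion : String) (out : List String × List String) : Prop := out = identificar_operadores_alt proposicion
instance (proposicion : String) (out : List String × List String) : Decidable (Spec_identificar_operadores proposicion out) := by unfold Spec_identificar_operadores; infer_instance

-- ===== CLAIM (what is proved, stated in full; the proofs are below) =====
def Claim_equal_identificar_operadores : Prop := ∀ (proposicion : String), Dom_identificar_operadores proposicion → Spec_identificar_operadores proposicion (identificar_operadores proposicion)

-- ===== LEMMAS AND PROOFS =====

-- a token is nonempty and whitespace-free (what split() produces)
def goodC (u : List Char) : Prop := u ≠ [] ∧ ∀ c ∈ u, PySem.Chars.isspace c = false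

def good (s : String) : Prop := goodC s.toList

theorem split₀_go_good (s cur : List Char) (acc : List (List Char))
    (hcur : ∀ c ∈ cur, PySem.Chars.isspace c = false)
    (hacc : ∀ u ∈ acc, goodC u) :
    ∀ u ∈ PySem.Chars.split₀.go s cur acc, goodC u := by
  induction s generalizing cur acc with
  | nil =>
    intro u hu
    simp only [PySem.Chars.split₀.go] at hu
    split at hu
    · exact hacc u (List.mem_reverse.mp hu)
    · rw [List.mem_reverse] at hu
      rcases List.mem_cons.mp hu with h | h
      · subst h
        constructor
        · simp only [List.isEmpty_iff] at *; simpa using by assumption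
        · intro c hc; exact hcur c (List.mem_reverse.mp hc)
      · exact hacc u h
  | cons c rest ih =>
    intro u hu
    simp only [PySem.Chars.split₀.go] at hu
    split at hu
    · split at hu
      · exact ih [] acc (by simp) hacc u hu
      · refine ih [] (cur.reverse :: acc) (by simp) ?_ u hu
        intro v hv
        rcases List.mem_cons.mp hv with h | h
        · subst h
          refine ⟨?_, fun d hd => hcur d (List.mem_reverse.mp hd)⟩
          simp only [ne_eq, List.reverse_eq_nil_iff]
          rename_i hc hne; simpa [List.isEmpty_iff] using hne
        · exact hacc v h
    · rename_i hns
      refine ih (c :: cur) acc ?_ hacc u hu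
      intro d hd
      rcases List.mem_cons.mp hd with h | h
      · subst h; simpa using hns
      · exact hcur d h

theorem split₀_good (s : String) : ∀ t ∈ PySem.Str.split₀ s, good t := by
  intro t ht
  simp only [PySem.Str.split₀, List.mem_map] at ht
  obtain ⟨u, hu, rfl⟩ := ht
  have := split₀_go_good s.toList [] [] (by simp) (by simp) u hu
  simpa [good, goodC] using this

-- the joined segment starts with a non-space character
theorem join_first (parts : List (List Char)) (h : parts ≠ [])
    (hg : ∀ u ∈ parts, goodC u) :
    ∃ c l, PySem.Chars.join [' '] parts = c :: l ∧ PySem.Chars.isspace c = false := by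
  match parts with
  | [] => exact absurd rfl h
  | [p] =>
    obtain ⟨hne, hsp⟩ := hg p (by simp)
    rcases p with _ | ⟨c, l⟩
    · exact absurd rfl hne
    · exact ⟨c, l, by simp [PySem.Chars.join_singleton], hsp c (by simp)⟩
  | p :: q :: rest =>
    obtain ⟨hne, hsp⟩ := hg p (by simp)
    rcases p with _ | ⟨c, l⟩
    · exact absurd rfl hne
    · exact ⟨c, l ++ [' '] ++ PySem.Chars.join [' '] (q :: rest),
        by simp [PySem.Chars.join_cons_cons], hsp c (by simp)⟩

-- the joined segment ends with a non-space character
theorem join_last (parts : List (List Char)) (h : parts ≠ [])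
    (hg : ∀ u ∈ parts, goodC u) :
    ∃ c l, PySem.Chars.join [' '] parts = l ++ [c] ∧ PySem.Chars.isspace c = false := by
  induction parts with
  | nil => exact absurd rfl h
  | cons p rest ih =>
    rcases rest with _ | ⟨q, rest'⟩
    · obtain ⟨hne, hsp⟩ := hg p (by simp)
      rcases hrev : p.reverse with _ | ⟨c, l⟩
      · exact absurd (by simpa using congrArg List.reverse hrev) hne
      · have hp : p = l.reverse ++ [c] := by
          have := congrArg List.reverse hrev; simpa using this
        exact ⟨c, l.reverse, by simp [PySem.Chars.join_singleton, hp],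
          hsp c (by rw [hp]; simp)⟩
    · obtain ⟨c, l, hjoin, hc⟩ := ih (by simp) (fun u hu => hg u (List.mem_cons_of_mem _ hu))
      exact ⟨c, p ++ [' '] ++ l,
        by rw [PySem.Chars.join_cons_cons, hjoin]; simp, hc⟩

theorem strip_join (parts : List String) (h : parts ≠ [])
    (hg : ∀ t ∈ parts, good t) :
    PySem.Str.strip (PySem.Str.join " " parts) = PySem.Str.join " " parts := by
  have hL : ∀ u ∈ parts.map String.toList, goodC u := by
    intro u hu
    obtain ⟨t, ht, rfl⟩ := List.mem_map.mp hu
    exact hg t ht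
  have hne : parts.map String.toList ≠ [] := by simpa using h
  obtain ⟨c, l, hjoin1, hc⟩ := join_first _ hne hL
  obtain ⟨c', l', hjoin2, hc'⟩ := join_last _ hne hL
  show PySem.Str.strip (PySem.Str.join " " parts) = PySem.Str.join " " parts
  simp only [PySem.Str.strip, PySem.Str.join, String.toList_ofList]
  congr 1
  have hsep : (" " : String).toList = [' '] := rfl
  rw [hsep]
  set X := PySem.Chars.join [' '] (parts.map String.toList) with hX
  have h1 : PySem.Chars.lstrip X = X := by
    rw [hjoin1]; simp [PySem.Chars.lstrip, hc]
  have h2 : PySem.Chars.rstrip X = X := by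
    rw [hjoin2]; simp [PySem.Chars.rstrip, hc']
  rw [PySem.Chars.strip, h1, h2]

-- spec-level recursions: A's fused loop
def flush (temp : List String) (neg : Bool) : List String :=
  if temp = [] then [] else
    if neg then ["¬" ++ PySem.Str.join " " temp] else [PySem.Str.join " " temp]

def fa : List String → List String → Bool → List String × List String
  | [], temp, neg => ([], flush temp neg)
  | t :: ts, temp, neg =>
    if t = "no" then fa ts temp true
    else if t = "y" ∨ t = "and" ∨ t = "o" ∨ t = "or" then
      let r := fa ts [] (if temp = [] then neg else false)
      ((if t = "y" ∨ t = "and" then "and" else "or") :: r.1, flush temp neg ++ r.2)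
    else fa ts (temp ++ [t]) neg

-- spec-level recursions: B's two passes
def sp : List String → List String → List String × List (List String)
  | [], cur => ([], [cur])
  | t :: ts, cur =>
    if t = "y" ∨ t = "and" then
      let r := sp ts []
      ("and" :: r.1, cur :: r.2)
    else if t = "o" ∨ t = "or" then
      let r := sp ts []
      ("or" :: r.1, cur :: r.2)
    else sp ts (cur ++ [t])

def ph : List (List String) → Bool → List String
  | [], _ => []
  | seg :: rest, neg =>
    let w := seg.filter (fun x => x ≠ "no")
    let n := if w.length < seg.length then true else neg
    if w = [] then ph rest n
    else ((if n then "¬" else "") ++ PySem.Str.join " " w) :: ph rest false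

theorem A1 (ts : List String) (ops props temp : List String) (neg : Bool)
    (hts : ∀ t ∈ ts, good t) (htemp : ∀ t ∈ temp, good t) :
    finishA (ts.foldl stepA (ops, props, temp, neg))
      = (ops ++ (fa ts temp neg).1, props ++ (fa ts temp neg).2) := by
  induction ts generalizing ops props temp neg with
  | nil =>
    by_cases ht : temp = []
    · simp [finishA, fa, flush, ht]
    · have hsj := strip_join temp ht htemp
      simp only [List.foldl_nil, finishA, fa, flush]
      rw [if_pos ht, if_neg ht, hsj]
      split_ifs <;> simp
  | cons t ts ih =>
    have htl : ∀ u ∈ ts, good u := fun u hu => hts u (List.mem_cons_of_mem _ hu)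
    rw [List.foldl_cons]
    by_cases hno : t = "no"
    · subst hno
      have hstep : stepA (ops, props, temp, neg) "no" = (ops, props, temp, true) := by
        simp [stepA]
      rw [hstep]
      simp only [fa]
      rw [if_pos trivial]
      exact ih ops props temp true htl htemp
    · by_cases hop : t = "y" ∨ t = "and" ∨ t = "o" ∨ t = "or"
      · by_cases ht : temp = []
        · subst ht
          have hstep : stepA (ops, props, [], neg) t
              = (ops ++ [if t = "y" ∨ t = "and" then "and" else "or"], props, [], neg) := by
            simp [stepA, hno, hop]
          rw [hstep]
          simp only [fa]
          rw [if_neg hno, if_pos hop]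
          rw [ih _ _ _ _ htl (by simp)]
          simp [flush]
        · have hsj := strip_join temp ht htemp
          have hstep : stepA (ops, props, temp, neg) t
              = (ops ++ [if t = "y" ∨ t = "and" then "and" else "or"],
                  props ++ flush temp neg, [], false) := by
            simp only [stepA]
            rw [if_neg hno, if_pos hop, if_pos ht, hsj]
            simp only [flush]
            rw [if_neg ht]
            split_ifs <;> simp_all
          rw [hstep]
          simp only [fa]
          rw [if_neg hno, if_pos hop, if_neg ht]
          rw [ih _ _ _ _ htl (by simp)]
          simp
      · have hstep : stepA (ops, props, temp, neg) t = (ops, props, temp ++ [t], neg) := by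
          simp [stepA, hno, hop]
        rw [hstep]
        simp only [fa]
        rw [if_neg hno, if_neg hop]
        refine ih _ _ _ _ htl ?_
        intro u hu
        rcases List.mem_append.mp hu with h | h
        · exact htemp u h
        · rw [List.mem_singleton.mp h]
          exact hts t (List.mem_cons_self ..)

theorem B1 (ts : List String) (ops : List String) (segs : List (List String)) (cur : List String) :
    ((ts.foldl stepB1 (ops, segs, cur)).1,
        (ts.foldl stepB1 (ops, segs, cur)).2.1 ++ [(ts.foldl stepB1 (ops, segs, cur)).2.2])
      = (ops ++ (sp ts cur).1, segs ++ (sp ts cur).2) := by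
  induction ts generalizing ops segs cur with
  | nil => simp [sp]
  | cons t ts ih =>
    simp only [List.foldl_cons, sp, stepB1]
    split_ifs with h1 h2
    · rw [ih]; simp
    · rw [ih]; simp
    · rw [ih]

theorem B2 (segs : List (List String)) (props : List String) (neg : Bool) :
    (segs.foldl stepB2 (props, neg)).1 = props ++ ph segs neg := by
  induction segs generalizing props neg with
  | nil => simp [ph]
  | cons seg rest ih =>
    rw [List.foldl_cons]
    have hstep : stepB2 (props, neg) seg =
        if seg.filter (fun w => w ≠ "no") ≠ [] then
          (props ++ [(if (if (seg.filter (fun w => w ≠ "no")).length < seg.length then true else neg)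
              then "¬" else "") ++ PySem.Str.join " " (seg.filter (fun w => w ≠ "no"))], false)
        else (props, if (seg.filter (fun w => w ≠ "no")).length < seg.length then true else neg) := rfl
    rw [hstep]
    show _ = props ++ ph (seg :: rest) neg
    rw [ph]
    by_cases hw : seg.filter (fun w => w ≠ "no") = []
    · rw [if_neg (by simpa using hw), if_pos hw, ih]
    · rw [if_pos hw, if_neg hw, ih]
      simp

theorem negEq (cur : List String) (neg : Bool) :
    (if ((cur.filter (fun x => x ≠ "no")).length < cur.length) then true else neg)
      = (neg || cur.any (fun x => x = "no")) := by
  induction cur with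
  | nil => simp
  | cons x xs ih =>
    by_cases hx : x = "no"
    · subst hx
      have hle : (List.filter (fun x => !decide (x = "no")) xs).length ≤ xs.length :=
        List.length_filter_le _ xs
      simp only [List.filter_cons, List.any_cons]
      simp [hle]
    · simp only [List.filter_cons, List.any_cons]
      simpa [hx] using ih

theorem phHead (cur : List String) (neg : Bool) (rest : List (List String)) :
    ph (cur :: rest) neg
      = flush (cur.filter (fun x => x ≠ "no")) (neg || cur.any (fun x => x = "no"))
        ++ ph rest (if cur.filter (fun x => x ≠ "no") = []
            then (neg || cur.any (fun x => x = "no")) else false) := by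
  show (if cur.filter (fun x => x ≠ "no") = []
      then ph rest (if (cur.filter (fun x => x ≠ "no")).length < cur.length then true else neg)
      else ((if (if (cur.filter (fun x => x ≠ "no")).length < cur.length then true else neg)
              then "¬" else "")
            ++ PySem.Str.join " " (cur.filter (fun x => x ≠ "no"))) :: ph rest false) = _
  rw [negEq cur neg]
  by_cases hw : cur.filter (fun x => x ≠ "no") = []
  · rw [if_pos hw, if_pos hw, hw]
    show _ = flush [] _ ++ _
    simp [flush]
  · rw [if_neg hw, if_neg hw]
    show _ = flush _ _ ++ _
    have hw' : ¬ ∀ a ∈ cur, a = "no" := by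
      simpa using hw
    by_cases hn : (neg || cur.any (fun x => x = "no")) = true
    · simp [flush, hw', hn]
    · rw [Bool.not_eq_true] at hn
      simp [flush, hw', hn]

theorem M (ts cur : List String) (neg : Bool) :
    fa ts (cur.filter (fun x => x ≠ "no")) (neg || cur.any (fun x => x = "no"))
      = ((sp ts cur).1, ph (sp ts cur).2 neg) := by
  induction ts generalizing cur neg with
  | nil =>
    show (([] : List String),
        flush (cur.filter (fun x => x ≠ "no")) (neg || cur.any (fun x => x = "no")))
      = (([] : List String), ph [cur] neg)
    rw [phHead]
    simp only [ph, List.append_nil]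
  | cons t ts ih =>
    by_cases hno : t = "no"
    · subst hno
      simp only [fa, sp]
      rw [if_pos trivial, if_neg (by decide : ¬(("no" : String) = "y" ∨ ("no" : String) = "and")),
        if_neg (by decide : ¬(("no" : String) = "o" ∨ ("no" : String) = "or"))]
      have h1 : (cur ++ ["no"]).filter (fun x => x ≠ "no") = cur.filter (fun x => x ≠ "no") := by
        simp
      have h2 : (cur ++ ["no"]).any (fun x => x = "no") = true := by simp
      have hcur := ih (cur ++ ["no"]) neg
      rw [h1, h2, Bool.or_true] at hcur
      exact hcur
    · have core : ∀ op : String,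
          (op :: (fa ts [] (if cur.filter (fun x => x ≠ "no") = []
              then (neg || cur.any (fun x => x = "no")) else false)).1,
            flush (cur.filter (fun x => x ≠ "no")) (neg || cur.any (fun x => x = "no"))
              ++ (fa ts [] (if cur.filter (fun x => x ≠ "no") = []
                  then (neg || cur.any (fun x => x = "no")) else false)).2)
          = (op :: (sp ts []).1, ph (cur :: (sp ts []).2) neg) := by
        intro op
        have hih := ih [] (if cur.filter (fun x => x ≠ "no") = []
            then (neg || cur.any (fun x => x = "no")) else false)
        rw [List.filter_nil, List.any_nil, Bool.or_false] at hih
        rw [hih, phHead]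
      by_cases hy : t = "y" ∨ t = "and"
      · have hop : t = "y" ∨ t = "and" ∨ t = "o" ∨ t = "or" := by tauto
        simp only [fa, sp]
        rw [if_neg hno, if_pos hop, if_pos hy, if_pos hy]
        exact core "and"
      · by_cases ho2 : t = "o" ∨ t = "or"
        · have hop : t = "y" ∨ t = "and" ∨ t = "o" ∨ t = "or" := by tauto
          simp only [fa, sp]
          rw [if_neg hno, if_pos hop, if_neg hy, if_neg hy, if_pos ho2]
          exact core "or"
        · have hop : ¬(t = "y" ∨ t = "and" ∨ t = "o" ∨ t = "or") := by tauto
          simp only [fa, sp]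
          rw [if_neg hno, if_neg hop, if_neg hy, if_neg ho2]
          have h1 : (cur ++ [t]).filter (fun x => x ≠ "no")
              = cur.filter (fun x => x ≠ "no") ++ [t] := by
            simp [hno]
          have h2 : (cur ++ [t]).any (fun x => x = "no") = cur.any (fun x => x = "no") := by
            simp [hno]
          have hcur := ih (cur ++ [t]) neg
          rw [h1, h2] at hcur
          exact hcur

-- ===== VERDICT (by name: the statement is the Claim_ definition above) =====
theorem identificar_operadores_spec : Claim_equal_identificar_operadores := by
  intro p _
  unfold Spec_identificar_operadores identificar_operadores identificar_operadores_alt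
  have hgood := split₀_good (PySem.Str.lower p)
  set tokens := PySem.Str.split₀ (PySem.Str.lower p) with htok
  have hA := A1 tokens [] [] [] false hgood (by simp)
  have hB1 := B1 tokens [] [] []
  have hB2 := B2 ((sp tokens []).2) [] false
  have hM := M tokens [] false
  simp only [List.filter_nil, List.any_nil, Bool.or_false] at hM
  simp only [List.nil_append] at hA hB1 hB2
  rcases hfold : tokens.foldl stepB1 ([], [], []) with ⟨o, s, a⟩
  simp only [hfold] at hB1
  have ho : o = (sp tokens []).1 := congrArg Prod.fst hB1
  have hs : s ++ [a] = (sp tokens []).2 := congrArg Prod.snd hB1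
  rw [hA, hM]
  simp only [hfold, ho, hs, hB2]
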